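-- pv_equiv track=rewrite | github.com/zyzhang1130/LifelongAgentBench | train copy.py | get_turn_idx_from_session
-- ===== SOURCE A (Python) =====
-- def get_turn_idx_from_session(session):
--     try:
--         hist = session.get("chat_history", {}).get("value", [])
--     except Exception:
--         return 0
--     # find the last user message
--     last_user_idx = -1
--     for i in range(len(hist) - 1, -1, -1):
--         if hist[i].get("role") == "user":
--             last_user_idx = i
--             break
--     if last_user_idx == -1:
--         return 0
--     # count agent messages after the last user
--     return sum(1 for m in hist[last_user_idx + 1 :] if m.get("role") != "user")
-- ===== SOURCE B (Python) =====
-- def get_turn_idx_from_session(session):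
--     try:
--         hist = session.get("chat_history", {}).get("value", [])
--     except Exception:
--         return 0
--     count = 0
--     for m in reversed(hist):
--         if m.get("role") == "user":
--             return count
--         count += 1
--     return 0
-- ===== Notes on version B (the rewrite author's own statement) =====
-- stated objective: simpler
-- what changed: Replaced the find-last-user index scan plus a second counting pass over a slice by a single reverse loop that counts non-user messages until it meets the last user message.
import Mathlib
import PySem

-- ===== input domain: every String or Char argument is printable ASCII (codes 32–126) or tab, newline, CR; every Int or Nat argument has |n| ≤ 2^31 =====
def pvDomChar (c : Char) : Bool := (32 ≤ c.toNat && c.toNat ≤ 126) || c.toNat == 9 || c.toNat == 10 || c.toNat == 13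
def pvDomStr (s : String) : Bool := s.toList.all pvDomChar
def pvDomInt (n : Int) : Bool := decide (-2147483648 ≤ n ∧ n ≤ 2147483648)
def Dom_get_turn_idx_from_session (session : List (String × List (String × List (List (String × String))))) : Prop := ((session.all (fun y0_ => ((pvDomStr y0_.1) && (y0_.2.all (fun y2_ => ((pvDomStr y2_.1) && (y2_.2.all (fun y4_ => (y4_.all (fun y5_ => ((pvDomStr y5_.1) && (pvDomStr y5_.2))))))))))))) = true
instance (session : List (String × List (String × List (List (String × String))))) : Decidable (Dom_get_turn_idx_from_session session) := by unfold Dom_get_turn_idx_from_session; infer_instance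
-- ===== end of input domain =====

-- B replaces A's find-last-user index scan + second counting pass over a slice
-- by one reverse loop that counts until it meets the last user message (objective: simpler).

-- ===== PORT A =====
-- m.get("role") ; comparison with "user" is on Option String (None == "user" is False in Python)
def pvRole (m : List (String × String)) : Option String :=
  (PySem.Dict.mk m).get? "role"

-- hist = session.get("chat_history", {}).get("value", []) ; dict.get never raises,
-- so A's 'except' branch is unreachable on this input type and A is total.
def pvHist (session : List (String × List (String × List (List (String × String))))) :
    List (List (String × String)) :=
  (PySem.Dict.mk ((PySem.Dict.mk session).getD "chat_history" [])).getD "value" []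

-- the 'for i in range(len(hist)-1, -1, -1): if …: last_user_idx = i; break' loop
def pvFindLast (hist : List (List (String × String))) : List Int → Int
  | [] => -1
  | i :: rest =>
      if pvRole (PySem.List.pyGetD hist i []) = some "user" then i
      else pvFindLast hist rest

def get_turn_idx_from_session (session : List (String × List (String × List (List (String × String))))) : Int :=
  let hist := pvHist session
  let last_user_idx := pvFindLast hist (PySem.List.pyRange ((hist.length : Int) - 1) (-1) (-1))
  if last_user_idx = -1 then 0
  else
    -- sum(1 for m in hist[last_user_idx+1:] if m.get("role") != "user")
    (PySem.List.slice hist (some (last_user_idx + 1)) none).foldl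
      (fun acc m => if pvRole m ≠ some "user" then acc + 1 else acc) 0

-- ===== PORT B =====
-- 'for m in reversed(hist): if role == "user": return count; count += 1' / 'return 0'
def pvRevCount : List (List (String × String)) → Int → Int
  | [], _ => 0
  | m :: rest, count =>
      if pvRole m = some "user" then count
      else pvRevCount rest (count + 1)

def get_turn_idx_from_session_alt (session : List (String × List (String × List (List (String × String))))) : Int :=
  let hist := pvHist session
  pvRevCount hist.reverse 0

-- ===== PRECONDITION & SPEC =====
def Spec_get_turn_idx_from_session (session : List (String × List (String × List (List (String × String))))) (out : Int) : Prop := out = get_turn_idx_from_session_alt session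
instance (session : List (String × List (String × List (List (String × String))))) (out : Int) : Decidable (Spec_get_turn_idx_from_session session out) := by unfold Spec_get_turn_idx_from_session; infer_instance

-- ===== CLAIM (what is proved, stated in full; the proofs are below) =====
def Claim_equal_get_turn_idx_from_session : Prop := ∀ (session : List (String × List (String × List (List (String × String))))), Dom_get_turn_idx_from_session session → Spec_get_turn_idx_from_session session (get_turn_idx_from_session session)

-- ===== LEMMAS AND PROOFS =====

-- pvFindLast's result is -1 or one of the scanned indices
lemma pvFindLast_mem (hist : List (List (String × String))) :
    ∀ idxs : List Int, pvFindLast hist idxs = -1 ∨ pvFindLast hist idxs ∈ idxs := by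
  intro idxs
  induction idxs with
  | nil => left; rfl
  | cons i rest ih =>
      by_cases h : pvRole (PySem.List.pyGetD hist i []) = some "user"
      · right; simp [pvFindLast, h]
      · rcases ih with h1 | h1
        · left; simpa [pvFindLast, h] using h1
        · right
          simp only [pvFindLast, if_neg h]
          exact List.mem_cons_of_mem _ h1

-- appending one element does not affect a scan over in-range indices
lemma pvFindLast_append (ys : List (List (String × String))) (m : List (String × String)) :
    ∀ idxs : List Int, (∀ i ∈ idxs, 0 ≤ i ∧ i < (ys.length : Int)) →
      pvFindLast (ys ++ [m]) idxs = pvFindLast ys idxs := by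
  intro idxs
  induction idxs with
  | nil => intro _; rfl
  | cons i rest ih =>
      intro h
      obtain ⟨h0, hlt⟩ := h i (by simp)
      have hget : PySem.List.pyGetD (ys ++ [m]) i ([] : List (String × String)) =
          PySem.List.pyGetD ys i [] := by
        rw [PySem.List.pyGetD_eq_getElem _ _ h0 (by simp; omega),
            PySem.List.pyGetD_eq_getElem _ _ h0 (by omega)]
        exact List.getElem_append_left (by omega)
      simp only [pvFindLast, hget]
      split
      · rfl
      · exact ih (fun j hj => h j (by simp [hj]))

-- the last appended element is hist[len-1]
lemma pyGetD_append_len (ys : List (List (String × String))) (m : List (String × String)) :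
    PySem.List.pyGetD (ys ++ [m]) (ys.length : Int) ([] : List (String × String)) = m := by
  rw [PySem.List.pyGetD_eq_getElem _ _ (by omega) (by simp)]
  simp

-- pvFindLast over the full countdown range returns -1 iff no user message
lemma pvFindLast_eq_neg_one_iff (ys : List (List (String × String))) :
    pvFindLast ys (PySem.List.pyRange ((ys.length : Int) - 1) (-1) (-1)) = -1 ↔
      ∀ x ∈ ys, pvRole x ≠ some "user" := by
  induction ys using List.reverseRecOn with
  | nil =>
      rw [PySem.List.pyRange_neg_one_eq_nil (by simp)]
      simp [pvFindLast]
  | append_singleton ys m ih =>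
      have hl : ((ys ++ [m]).length : Int) - 1 = (ys.length : Int) := by simp
      rw [hl, PySem.List.pyRange_neg_one_cons (by omega)]
      simp only [pvFindLast, pyGetD_append_len]
      by_cases hu : pvRole m = some "user"
      · rw [if_pos hu]
        constructor
        · intro h; exfalso; omega
        · intro h; exact absurd hu (h m (by simp))
      · rw [if_neg hu]
        rw [pvFindLast_append ys m _ (by
          intro i hi
          rw [PySem.List.mem_pyRange_neg_one] at hi
          omega)]
        rw [ih]
        constructor
        · intro h x hx
          rcases List.mem_append.mp hx with h1 | h1
          · exact h x h1
          · simp at h1; subst h1; exact hu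
        · intro h x hx; exact h x (by simp [hx])

-- if no user message is present the reverse count is 0 for any accumulator
lemma pvRevCount_of_no_user (xs : List (List (String × String)))
    (h : ∀ x ∈ xs, pvRole x ≠ some "user") : ∀ acc, pvRevCount xs acc = 0 := by
  induction xs with
  | nil => intro acc; rfl
  | cons m rest ih =>
      intro acc
      have hm := h m (by simp)
      simp only [pvRevCount, if_neg hm]
      exact ih (fun x hx => h x (by simp [hx])) (acc + 1)

-- accumulator shift: while a user message is present, the count is acc + count from 0
lemma pvRevCount_shift (xs : List (List (String × String)))
    (h : ∃ x ∈ xs, pvRole x = some "user") :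
    ∀ acc, pvRevCount xs acc = acc + pvRevCount xs 0 := by
  induction xs with
  | nil => simp at h
  | cons m rest ih =>
      intro acc
      by_cases hm : pvRole m = some "user"
      · simp [pvRevCount, hm]
      · have hrest : ∃ x ∈ rest, pvRole x = some "user" := by
          rcases h with ⟨x, hx, hxu⟩
          rcases List.mem_cons.mp hx with h1 | h1
          · subst h1; exact absurd hxu hm
          · exact ⟨x, h1, hxu⟩
        simp only [pvRevCount, if_neg hm]
        rw [ih hrest (acc + 1), ih hrest (0 + 1)]
        ring

-- the core equivalence on the extracted history list
lemma core_eq (hist : List (List (String × String))) :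
    (let last_user_idx := pvFindLast hist (PySem.List.pyRange ((hist.length : Int) - 1) (-1) (-1))
     if last_user_idx = -1 then 0
     else (PySem.List.slice hist (some (last_user_idx + 1)) none).foldl
        (fun acc m => if pvRole m ≠ some "user" then acc + 1 else acc) (0 : Int)) =
    pvRevCount hist.reverse 0 := by
  induction hist using List.reverseRecOn with
  | nil =>
      rw [PySem.List.pyRange_neg_one_eq_nil (by simp)]
      simp [pvFindLast, pvRevCount]
  | append_singleton ys m ih =>
      have hl : (((ys ++ [m]).length : Int)) - 1 = (ys.length : Int) := by simp
      rw [hl, PySem.List.pyRange_neg_one_cons (by omega)]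
      simp only [pvFindLast, pyGetD_append_len, List.reverse_append,
        List.reverse_singleton, List.singleton_append]
      by_cases hu : pvRole m = some "user"
      · -- the appended message is the last user: A counts an empty slice, B returns 0
        rw [if_pos hu]
        rw [if_neg (show ¬ ((ys.length : Int) = -1) by omega)]
        have hslice : PySem.List.slice (ys ++ [m]) (some ((ys.length : Int) + 1)) none = [] := by
          rw [PySem.List.slice_from _ (by omega)]
          have h1 : ((ys.length : Int) + 1).toNat = ys.length + 1 := by omega
          rw [h1]
          simp
        rw [hslice]
        simp [pvRevCount, hu]
      · rw [if_neg hu]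
        rw [pvFindLast_append ys m _ (by
          intro i hi
          rw [PySem.List.mem_pyRange_neg_one] at hi
          omega)]
        simp only [pvRevCount, if_neg hu]
        by_cases hneg : pvFindLast ys (PySem.List.pyRange ((ys.length : Int) - 1) (-1) (-1)) = -1
        · -- no user anywhere: both sides are 0
          rw [if_pos hneg]
          have hnone := (pvFindLast_eq_neg_one_iff ys).mp hneg
          exact (pvRevCount_of_no_user ys.reverse
            (fun x hx => hnone x (List.mem_reverse.mp hx)) (0 + 1)).symm
        · -- a user exists in ys at index r; A's slice of ys++[m] is (slice of ys) ++ [m]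
          rw [if_neg hneg]
          set r := pvFindLast ys (PySem.List.pyRange ((ys.length : Int) - 1) (-1) (-1)) with hr
          have hrmem : r ∈ PySem.List.pyRange ((ys.length : Int) - 1) (-1) (-1) := by
            rcases pvFindLast_mem ys (PySem.List.pyRange ((ys.length : Int) - 1) (-1) (-1)) with h1 | h1
            · exact absurd h1 hneg
            · exact h1
          rw [PySem.List.mem_pyRange_neg_one] at hrmem
          have hdrop : PySem.List.slice (ys ++ [m]) (some (r + 1)) none =
              PySem.List.slice ys (some (r + 1)) none ++ [m] := by
            rw [PySem.List.slice_from _ (by omega), PySem.List.slice_from _ (by omega)]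
            rw [List.drop_append_of_le_length (by omega)]
          rw [hdrop, List.foldl_append]
          simp only [List.foldl_cons, List.foldl_nil, if_pos hu]
          -- B side: shift the accumulator; A side: reuse the induction hypothesis
          have huser : ∃ x ∈ ys.reverse, pvRole x = some "user" := by
            by_contra hc
            push Not at hc
            exact hneg ((pvFindLast_eq_neg_one_iff ys).mpr
              (fun x hx => hc x (List.mem_reverse.mpr hx)))
          rw [pvRevCount_shift ys.reverse huser (0 + 1)]
          have hih := ih
          rw [if_neg hneg] at hih
          rw [hih]
          ring

-- ===== VERDICT (by name: the statement is the Claim_ definition above) =====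
theorem get_turn_idx_from_session_spec : Claim_equal_get_turn_idx_from_session := by
  intro session _
  unfold Spec_get_turn_idx_from_session get_turn_idx_from_session get_turn_idx_from_session_alt
  exact core_eq (pvHist session)
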